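-- pv_equiv track=rewrite | github.com/rubelw/OSSS | src/OSSS/ai/agents/query_data/handlers/gl_segments_handler.py | _select_gl_segments_fields
-- ===== SOURCE A (Python) =====
-- from typing import Any, Dict, List, Sequence
--
-- def _select_gl_segments_fields(
--     rows: Sequence[Dict[str, Any]],
-- ) -> List[str]:
--     """
--     Choose a stable, user-friendly column ordering, but gracefully
--     include any extra keys that the API returns.
--     """
--     if not rows:
--         return []
--
--     # Adjust this preferred order to match your actual gl_segments schema.
--     preferred_order = [
--         "id",
--         "segment_code",
--         "segment_name",
--         "segment_type",         # e.g. fund, function, project, location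
--         "segment_number",
--         "description",
--         "is_required",
--         "is_active",
--         "length",
--         "default_value",
--         "sort_order",
--         "cohort_year",
--         "created_at",
--         "updated_at",
--     ]
--
--     all_keys: List[str] = []
--     for r in rows:
--         for k in r.keys():
--             if k not in all_keys:
--                 all_keys.append(k)
--
--     ordered = [k for k in preferred_order if k in all_keys]
--     ordered.extend(k for k in all_keys if k not in ordered)
--     return ordered
-- ===== SOURCE B (Python) =====
-- from typing import Any, Dict, List, Sequence
--
--
-- def _select_gl_segments_fields(
--     rows: Sequence[Dict[str, Any]],
-- ) -> List[str]:
--     """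
--     Rank-table + single stable sort: give every distinct key a numeric
--     position (its index in the preferred order, or a unique later position
--     preserving first-seen order) and sort the keys by it.
--     """
--     if not rows:
--         return []
--
--     preferred_order = [
--         "id",
--         "segment_code",
--         "segment_name",
--         "segment_type",
--         "segment_number",
--         "description",
--         "is_required",
--         "is_active",
--         "length",
--         "default_value",
--         "sort_order",
--         "cohort_year",
--         "created_at",
--         "updated_at",
--     ]
--
--     n = len(preferred_order)
--     rank = {name: i for i, name in enumerate(preferred_order)}
--     keys = list(dict.fromkeys(k for r in rows for k in r.keys()))
--     pos = {k: rank.get(k, n + i) for i, k in enumerate(keys)}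
--     return sorted(keys, key=lambda k: pos[k])
-- ===== Notes on version B (the rewrite author's own statement) =====
-- stated objective: alternative
-- what changed: Replaces A's two quadratic membership-scan passes (list dedup with 'not in', then filter-by-membership plus a mutating extend) by a rank dict built from preferred_order, a dict.fromkeys dedup, a per-key numeric position table, and a single sort of the keys by that position.
import Mathlib
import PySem

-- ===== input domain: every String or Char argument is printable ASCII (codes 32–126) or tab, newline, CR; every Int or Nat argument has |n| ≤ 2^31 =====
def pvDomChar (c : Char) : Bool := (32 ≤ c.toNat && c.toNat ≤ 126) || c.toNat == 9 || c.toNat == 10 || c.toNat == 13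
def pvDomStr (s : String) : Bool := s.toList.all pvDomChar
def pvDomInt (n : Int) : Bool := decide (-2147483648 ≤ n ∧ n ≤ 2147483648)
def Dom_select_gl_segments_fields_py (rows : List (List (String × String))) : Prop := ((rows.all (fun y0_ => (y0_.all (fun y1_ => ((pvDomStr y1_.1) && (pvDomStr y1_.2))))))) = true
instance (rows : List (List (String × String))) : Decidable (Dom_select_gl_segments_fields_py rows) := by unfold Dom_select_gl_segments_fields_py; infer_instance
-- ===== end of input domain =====

-- B replaces A's membership-filter + mutating extend with a rank table and one stable sort by a
-- numeric position per key (objective: alternative — genuinely different algorithm, similar cost).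

-- the literal preferred_order list, shared by both ports
def pvPref : List String :=
  ["id", "segment_code", "segment_name", "segment_type", "segment_number",
   "description", "is_required", "is_active", "length", "default_value",
   "sort_order", "cohort_year", "created_at", "updated_at"]

-- ===== PORT A =====
def select_gl_segments_fields_py (rows : List (List (String × String))) : List String :=
  if rows = [] then []
  else
    -- all_keys: first-seen distinct keys, via the 'if k not in all_keys: append' loop
    let all_keys : List String :=
      rows.foldl (fun acc r =>
        (PySem.List.dedup (r.map Prod.fst)).foldl (fun ak k => if ak.contains k then ak else ak ++ [k]) acc) []
    -- ordered = [k for k in preferred_order if k in all_keys]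
    let ordered : List String := pvPref.filter (fun k => all_keys.contains k)
    -- ordered.extend(k for k in all_keys if k not in ordered): the generator tests membership in
    -- the *growing* ordered list, which is exactly this fold
    all_keys.foldl (fun ord k => if ord.contains k then ord else ord ++ [k]) ordered

-- ===== PORT B =====
def select_gl_segments_fields_py_alt (rows : List (List (String × String))) : List String :=
  if rows = [] then []
  else
    let n : Int := PySem.List.len pvPref
    -- rank = {name: i for i, name in enumerate(preferred_order)}
    let rank : PySem.Dict String Int :=
      (PySem.List.enumerate pvPref 0).foldl (fun d p => d.insert p.2 p.1) PySem.Dict.empty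
    -- keys = list(dict.fromkeys(k for r in rows for k in r.keys()))
    let keys : List String := PySem.List.dedup (rows.flatMap (fun r => PySem.List.dedup (r.map Prod.fst)))
    -- pos = {k: rank.get(k, n + i) for i, k in enumerate(keys)}
    let pos : PySem.Dict String Int :=
      (PySem.List.enumerate keys 0).foldl
        (fun d p => d.insert p.2 (PySem.Dict.getD rank p.2 (n + p.1))) PySem.Dict.empty
    -- sorted(keys, key=lambda k: pos[k]); pos maps every element of keys, so the
    -- getD default 0 is never consulted — exact
    PySem.List.sorted keys (fun k => PySem.Dict.getD pos k 0)

-- ===== PRECONDITION & SPEC =====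
def Spec_select_gl_segments_fields_py (rows : List (List (String × String))) (out : List String) : Prop := out = select_gl_segments_fields_py_alt rows
instance (rows : List (List (String × String))) (out : List String) : Decidable (Spec_select_gl_segments_fields_py rows out) := by unfold Spec_select_gl_segments_fields_py; infer_instance

-- ===== CLAIM (what is proved, stated in full; the proofs are below) =====
def Claim_equal_select_gl_segments_fields_py : Prop := ∀ (rows : List (List (String × String))), Dom_select_gl_segments_fields_py rows → Spec_select_gl_segments_fields_py rows (select_gl_segments_fields_py rows)

-- ===== LEMMAS AND PROOFS =====

-- folding 'append if new' over a duplicate-free list appends exactly its fresh elements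
theorem pv_addAll (xs : List String) (h : xs.Nodup) :
    ∀ s : List String,
      xs.foldl (fun acc k => if acc.contains k then acc else acc ++ [k]) s
        = s ++ xs.filter (fun k => !s.contains k) := by
  induction xs with
  | nil => intro s; simp
  | cons x t ih =>
    intro s
    rcases List.nodup_cons.mp h with ⟨hx, ht⟩
    simp only [List.foldl_cons, List.filter_cons]
    by_cases hc : s.contains x
    · rw [if_pos hc, ih ht s]
      simp [List.contains_iff_mem.mp hc]
    · rw [if_neg hc, ih ht (s ++ [x])]
      have hcongr : ∀ k ∈ t, (!(s ++ [x]).contains k) = (!s.contains k) := by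
        intro k hkt
        have hkx : k ≠ x := ne_of_mem_of_not_mem hkt hx
        simp [hkx]
      rw [List.filter_congr hcongr]
      have hxs : x ∉ s := fun hm => hc (List.contains_iff_mem.mpr hm)
      simp [hxs]
  
-- a duplicate-free list is strictly increasing under its own idxOf
theorem pv_nodup_pairwise_idxOf (l : List String) (h : l.Nodup) :
    l.Pairwise (fun a b => List.idxOf a l < List.idxOf b l) := by
  induction l with
  | nil => simp
  | cons x t ih =>
    rcases List.nodup_cons.mp h with ⟨hx, ht⟩
    refine List.pairwise_cons.mpr ⟨?_, ?_⟩
    · intro b hb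
      have hbx : x ≠ b := (ne_of_mem_of_not_mem hb hx).symm
      rw [List.idxOf_cons_self, List.idxOf_cons_ne _ hbx]
      exact Nat.succ_pos _
    · refine (ih ht).imp_of_mem ?_
      intro a b ha hb hlt
      rw [List.idxOf_cons_ne _ (ne_of_mem_of_not_mem ha hx).symm,
          List.idxOf_cons_ne _ (ne_of_mem_of_not_mem hb hx).symm]
      omega

-- inserting entries whose keys avoid k leaves the lookup of k unchanged
theorem pv_dict_untouched (f : Int → String → Int) (k : String) (dflt : Int) :
    ∀ (t : List String) (s : Int) (d0 : PySem.Dict String Int), k ∉ t →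
      ((PySem.List.enumerate t s).foldl (fun d p => d.insert p.2 (f p.1 p.2)) d0).getD k dflt
        = d0.getD k dflt := by
  intro t
  induction t with
  | nil => intro s d0 _; simp [PySem.List.enumerate]
  | cons x t ih =>
    intro s d0 hk
    rw [PySem.List.enumerate_cons, List.foldl_cons,
        ih (s + 1) _ (fun h => hk (List.mem_cons_of_mem _ h)),
        PySem.Dict.getD_insert]
    have hkx : k ≠ x := fun e => hk (e ▸ List.mem_cons_self)
    rw [if_neg hkx]

-- lookup in the dict built from an enumerated duplicate-free list
theorem pv_dict_build (f : Int → String → Int) (k : String) (dflt : Int) :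
    ∀ (l : List String) (s : Int) (d0 : PySem.Dict String Int), l.Nodup → k ∈ l →
      ((PySem.List.enumerate l s).foldl (fun d p => d.insert p.2 (f p.1 p.2)) d0).getD k dflt
        = f (s + (List.idxOf k l : Int)) k := by
  intro l
  induction l with
  | nil => intro s d0 _ hk; cases hk
  | cons x t ih =>
    intro s d0 hnd hk
    rcases List.nodup_cons.mp hnd with ⟨hx, ht⟩
    rw [PySem.List.enumerate_cons, List.foldl_cons]
    by_cases hkx : k = x
    · subst hkx
      rw [pv_dict_untouched f k dflt t (s + 1) _ hx, PySem.Dict.getD_insert, if_pos rfl,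
          List.idxOf_cons_self]
      simp
    · have hkt : k ∈ t := (List.mem_cons.mp hk).resolve_left hkx
      rw [ih (s + 1) _ ht hkt, List.idxOf_cons_ne _ (Ne.symm hkx)]
      have : s + 1 + (List.idxOf k t : Int) = s + ((List.idxOf k t).succ : Int) := by
        push_cast; ring
      rw [this]

-- lookup in B's rank table
theorem pv_rank_getD (k : String) (d : Int) :
    ((PySem.List.enumerate pvPref 0).foldl (fun d p => d.insert p.2 p.1)
        PySem.Dict.empty).getD k d
      = if k ∈ pvPref then (List.idxOf k pvPref : Int) else d := by
  by_cases hk : k ∈ pvPref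
  · rw [if_pos hk, pv_dict_build (fun i _ => i) k d pvPref 0 PySem.Dict.empty (by decide) hk]
    simp
  · rw [if_neg hk, pv_dict_untouched (fun i _ => i) k d pvPref 0 PySem.Dict.empty hk,
        PySem.Dict.getD_empty]

-- the numeric position B assigns to a key
def pvKF (ks : List String) (k : String) : Int :=
  if k ∈ pvPref then (List.idxOf k pvPref : Int) else 14 + (List.idxOf k ks : Int)

-- lookup in B's pos table is pvKF
theorem pv_pos_getD (ks : List String) (hnd : ks.Nodup) (k : String) (hk : k ∈ ks) :
    ((PySem.List.enumerate ks 0).foldl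
        (fun d p => d.insert p.2
          (PySem.Dict.getD
            ((PySem.List.enumerate pvPref 0).foldl (fun d p => d.insert p.2 p.1)
              PySem.Dict.empty) p.2 (PySem.List.len pvPref + p.1)))
        PySem.Dict.empty).getD k 0
      = pvKF ks k := by
  rw [pv_dict_build (fun i s =>
        PySem.Dict.getD
          ((PySem.List.enumerate pvPref 0).foldl (fun d p => d.insert p.2 p.1)
            PySem.Dict.empty) s (PySem.List.len pvPref + i)) k 0 ks 0 PySem.Dict.empty hnd hk,
      pv_rank_getD]
  simp only [PySem.List.len_eq, pvKF]
  by_cases hp : k ∈ pvPref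
  · rw [if_pos hp, if_pos hp]
  · rw [if_neg hp, if_neg hp]
    norm_num [pvPref]

-- the target arrangement both programs produce
def pvTarget (ks : List String) : List String :=
  pvPref.filter (fun k => ks.contains k) ++ ks.filter (fun k => !(pvPref.contains k))

-- B's sort, applied to any duplicate-free key list, yields the target arrangement
theorem pv_B_sorted (ks : List String) (hnd : ks.Nodup) :
    PySem.List.sorted ks (fun k =>
      ((PySem.List.enumerate ks 0).foldl
        (fun d p => d.insert p.2
          (PySem.Dict.getD
            ((PySem.List.enumerate pvPref 0).foldl (fun d p => d.insert p.2 p.1)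
              PySem.Dict.empty) p.2 (PySem.List.len pvPref + p.1)))
        PySem.Dict.empty).getD k 0)
      = pvTarget ks := by
  have hmemT : ∀ k ∈ pvTarget ks, k ∈ ks := by
    intro k hk
    rcases List.mem_append.mp hk with h | h
    · exact List.contains_iff_mem.mp (List.of_mem_filter h)
    · exact List.mem_of_mem_filter h
  apply PySem.List.sorted_eq_of_perm_of_pairwise_lt
  · -- pvTarget ks is a permutation of ks
    have h1 : (pvPref.filter (fun k => ks.contains k)).Perm
        (ks.filter (fun k => pvPref.contains k)) := by
      rw [List.perm_ext_iff_of_nodup ((by decide : pvPref.Nodup).filter _) (hnd.filter _)]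
      intro a
      simp only [List.mem_filter, List.contains_iff_mem]
      exact and_comm
    exact (h1.append_right _).trans (List.filter_append_perm _ ks)
  · -- strictly increasing positions along pvTarget ks
    have hKF : (pvTarget ks).Pairwise (fun a b => pvKF ks a < pvKF ks b) := by
      refine List.pairwise_append.mpr ⟨?_, ?_, ?_⟩
      · refine ((pv_nodup_pairwise_idxOf pvPref (by decide)).sublist
          List.filter_sublist).imp_of_mem ?_
        intro a b ha hb hlt
        have ha' : a ∈ pvPref := List.mem_of_mem_filter ha
        have hb' : b ∈ pvPref := List.mem_of_mem_filter hb
        simp only [pvKF, if_pos ha', if_pos hb']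
        exact_mod_cast hlt
      · refine ((pv_nodup_pairwise_idxOf ks hnd).sublist
          List.filter_sublist).imp_of_mem ?_
        intro a b ha hb hlt
        have ha' : ¬ a ∈ pvPref := by
          have := List.of_mem_filter ha; simpa [List.contains_iff_mem] using this
        have hb' : ¬ b ∈ pvPref := by
          have := List.of_mem_filter hb; simpa [List.contains_iff_mem] using this
        simp only [pvKF, if_neg ha', if_neg hb']
        omega
      · intro a ha b hb
        have ha' : a ∈ pvPref := List.mem_of_mem_filter ha
        have hb' : ¬ b ∈ pvPref := by
          have := List.of_mem_filter hb; simpa [List.contains_iff_mem] using this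
        have hlt : List.idxOf a pvPref < 14 := by
          have := List.idxOf_lt_length_of_mem ha'
          simpa [pvPref] using this
        simp only [pvKF, if_pos ha', if_neg hb']
        omega
    refine hKF.imp_of_mem ?_
    intro a b ha hb hlt
    rw [pv_pos_getD ks hnd a (hmemT a ha), pv_pos_getD ks hnd b (hmemT b hb)]
    exact hlt

-- A's nested dedup loop is dict.fromkeys of the flattened key stream
theorem pv_A_keys (rows : List (List (String × String))) :
    rows.foldl (fun acc r =>
        (PySem.List.dedup (r.map Prod.fst)).foldl (fun ak k => if ak.contains k then ak else ak ++ [k]) acc) []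
      = PySem.List.dedup (rows.flatMap (fun r => PySem.List.dedup (r.map Prod.fst))) := by
  rw [← List.foldl_flatMap]
  rfl

-- A's filter + extend also yields the target arrangement
theorem pv_A_target (ks : List String) (hnd : ks.Nodup) :
    ks.foldl (fun ord k => if ord.contains k then ord else ord ++ [k])
        (pvPref.filter (fun k => ks.contains k))
      = pvTarget ks := by
  rw [pv_addAll ks hnd]
  unfold pvTarget
  congr 1
  refine List.filter_congr ?_
  intro x hx
  by_cases hp : x ∈ pvPref
  · simp [List.mem_filter, hp, hx]
  · simp [List.mem_filter, hp]

-- ===== VERDICT (by name: the statement is the Claim_ definition above) =====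
theorem select_gl_segments_fields_py_spec : Claim_equal_select_gl_segments_fields_py := by
  intro rows _
  unfold Spec_select_gl_segments_fields_py
  by_cases h : rows = []
  · simp [select_gl_segments_fields_py, select_gl_segments_fields_py_alt, h]
  · simp only [select_gl_segments_fields_py, select_gl_segments_fields_py_alt, if_neg h]
    rw [pv_A_keys rows,
        pv_A_target _ (PySem.List.nodup_dedup _),
        pv_B_sorted _ (PySem.List.nodup_dedup _)]
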